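-- pv_equiv track=rewrite | github.com/dogukanucak/langchain-evolving-prompt-researcher | compare_scope_impact.py | extract_final_report
-- ===== SOURCE A (Python) =====
-- def extract_final_report(output: str):
--     """Extract the final report from output."""
--     lines = output.split('\n')
--
--     # Find the FINAL REPORT section
--     start_idx = None
--     for i, line in enumerate(lines):
--         if 'FINAL REPORT' in line or 'Final Report' in line:
--             start_idx = i
--             break
--
--     if start_idx is None:
--         return None
--
--     # Extract everything after FINAL REPORT header
--     report_lines = []
--     in_report = False
--     for line in lines[start_idx:]:
--         if '=' * 20 in line and not in_report:
--             in_report = True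
--             continue
--         if in_report:
--             report_lines.append(line)
--
--     return '\n'.join(report_lines).strip()
-- ===== SOURCE B (Python) =====
-- def extract_final_report(output: str):
--     """Extract the final report by pure string-position arithmetic (no line
--     splitting): locate the earliest header occurrence, back up to its line
--     start, find the separator run from there, then take the text after the
--     newline that ends the separator's line."""
--     p1 = output.find('FINAL REPORT')
--     p2 = output.find('Final Report')
--     if p1 == -1 and p2 == -1:
--         return None
--     if p1 == -1:
--         pos = p2
--     elif p2 == -1:
--         pos = p1
--     else:
--         pos = min(p1, p2)
--     line_start = output.rfind('\n', 0, pos) + 1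
--     sep = output.find('=' * 20, line_start)
--     if sep == -1:
--         return ''
--     nl = output.find('\n', sep)
--     if nl == -1:
--         return ''
--     return output[nl + 1:].strip()
-- ===== Notes on version B (the rewrite author's own statement) =====
-- stated objective: alternative
-- what changed: B never splits the output into a line list: it works by character-position arithmetic on the whole string (find the earliest header occurrence, rfind the preceding newline to get the line start, find the '='*20 run from there, find the newline ending its line, and strip the remaining suffix), replacing A's enumerate-lines search plus flag-driven accumulation loop.
import Mathlib
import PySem

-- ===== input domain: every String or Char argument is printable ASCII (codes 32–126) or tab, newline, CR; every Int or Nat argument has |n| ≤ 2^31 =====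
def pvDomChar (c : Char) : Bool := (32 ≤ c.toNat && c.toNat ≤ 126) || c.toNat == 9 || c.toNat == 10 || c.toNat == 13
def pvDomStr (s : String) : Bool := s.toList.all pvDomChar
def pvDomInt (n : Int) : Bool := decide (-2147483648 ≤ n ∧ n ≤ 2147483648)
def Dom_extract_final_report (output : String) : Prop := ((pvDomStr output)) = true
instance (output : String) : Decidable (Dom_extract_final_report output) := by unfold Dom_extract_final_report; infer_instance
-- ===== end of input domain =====

-- B works by character-position arithmetic on the whole string (find/rfind), never building A's line list; alternative algorithm, same cost.

-- ===== PORT A =====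
-- the 'for i, line in enumerate(lines): … break' search
def pvFindStartA : List (Int × List Char) → Option Int
  | [] => none
  | (i, line) :: rest =>
    if PySem.Chars.isIn "FINAL REPORT".toList line || PySem.Chars.isIn "Final Report".toList line
    then some i else pvFindStartA rest

-- the 'for line in lines[start_idx:]' loop over the state (report_lines, in_report)
def pvReportLoopA : List (List Char) → List (List Char) × Bool → List (List Char) × Bool
  | [], st => st
  | line :: rest, (acc, inrep) =>
    if PySem.Chars.isIn "====================".toList line && !inrep then
      pvReportLoopA rest (acc, true)
    else if inrep then pvReportLoopA rest (acc ++ [line], inrep)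
    else pvReportLoopA rest (acc, inrep)

def extract_final_report (output : String) : Option String :=
  let lines := PySem.Chars.splitOn output.toList "\n".toList
  match pvFindStartA (PySem.List.enumerate lines 0) with
  | none => none
  | some start_idx =>
    let st := pvReportLoopA (PySem.List.slice lines (some start_idx) none) ([], false)
    some (String.ofList (PySem.Chars.strip (PySem.Chars.join "\n".toList st.1)))

-- ===== PORT B =====
def extract_final_report_alt (output : String) : Option String :=
  let s := output.toList
  let p1 := PySem.Chars.find s "FINAL REPORT".toList
  let p2 := PySem.Chars.find s "Final Report".toList
  if p1 = -1 ∧ p2 = -1 then none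
  else
    let pos := if p1 = -1 then p2 else if p2 = -1 then p1 else min p1 p2
    let line_start := PySem.Chars.rfindFrom s "\n".toList 0 (some pos) + 1
    let sep := PySem.Chars.findFrom s "====================".toList line_start
    if sep = -1 then some ""
    else
      let nl := PySem.Chars.findFrom s "\n".toList sep
      if nl = -1 then some ""
      else some (String.ofList (PySem.Chars.strip (PySem.List.slice s (some (nl + 1)) none)))

-- ===== PRECONDITION & SPEC =====
def Spec_extract_final_report (output : String) (out : Option String) : Prop := out = extract_final_report_alt output
instance (output : String) (out : Option String) : Decidable (Spec_extract_final_report output out) := by unfold Spec_extract_final_report; infer_instance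

-- ===== CLAIM (what is proved, stated in full; the proofs are below) =====
def Claim_equal_extract_final_report : Prop := ∀ (output : String), Dom_extract_final_report output → Spec_extract_final_report output (extract_final_report output)

-- ===== LEMMAS AND PROOFS =====

-- ---------- proof-only abbreviations ----------
def pvHdr (line : List Char) : Bool :=
  PySem.Chars.isIn "FINAL REPORT".toList line || PySem.Chars.isIn "Final Report".toList line

def pvSep (line : List Char) : Bool := PySem.Chars.isIn "====================".toList line

-- char-level value of A's tail computation on a list of lines
def pvATail (lines : List (List Char)) : List Char :=
  match lines.findIdx? pvSep with
  | none => []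
  | some j => PySem.Chars.strip (PySem.Chars.join ['\n'] (lines.drop (j + 1)))

-- char-level value of B's tail computation from a given line start
def pvBTail (s : List Char) (ls : Int) : List Char :=
  let sep := PySem.Chars.findFrom s "====================".toList ls
  if sep = -1 then []
  else
    let nl := PySem.Chars.findFrom s ['\n'] sep
    if nl = -1 then [] else PySem.Chars.strip (PySem.List.slice s (some (nl + 1)) none)

-- B's combined first-occurrence position
def pvPos (p1 p2 : Int) : Int := if p1 = -1 then p2 else if p2 = -1 then p1 else min p1 p2

-- ---------- splitOn structure ----------

theorem pvGo_nil (c : Char) (cur : List Char) (acc : List (List Char)) (fuel : Nat) :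
    PySem.Chars.splitOn.go [c] (fuel + 1) [] cur acc = (cur.reverse :: acc).reverse := by
  rw [PySem.Chars.splitOn.go]; simp

theorem pvGo_cons (c a : Char) (l cur : List Char) (acc : List (List Char)) (fuel : Nat) :
    PySem.Chars.splitOn.go [c] (fuel + 1) (a :: l) cur acc =
      if a = c then PySem.Chars.splitOn.go [c] fuel l [] (cur.reverse :: acc)
      else PySem.Chars.splitOn.go [c] fuel l (a :: cur) acc := by
  rw [PySem.Chars.splitOn.go]
  simp [List.isPrefixOf]
  by_cases h : a = c <;> simp [h]
  rw [eq_comm] at h; simp [h]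

theorem pvGo_fuel (c : Char) (l : List Char) :
    ∀ (fuel fuel' : Nat) (cur : List Char) (acc : List (List Char)),
      l.length < fuel → l.length < fuel' →
      PySem.Chars.splitOn.go [c] fuel l cur acc = PySem.Chars.splitOn.go [c] fuel' l cur acc := by
  induction l with
  | nil =>
    intro fuel fuel' cur acc h h'
    obtain ⟨f, rfl⟩ := Nat.exists_eq_succ_of_ne_zero (Nat.pos_iff_ne_zero.mp h)
    obtain ⟨f', rfl⟩ := Nat.exists_eq_succ_of_ne_zero (Nat.pos_iff_ne_zero.mp h')
    rw [pvGo_nil, pvGo_nil]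
  | cons a t ih =>
    intro fuel fuel' cur acc h h'
    obtain ⟨f, rfl⟩ := Nat.exists_eq_succ_of_ne_zero (Nat.pos_iff_ne_zero.mp (Nat.lt_of_le_of_lt (Nat.zero_le _) h))
    obtain ⟨f', rfl⟩ := Nat.exists_eq_succ_of_ne_zero (Nat.pos_iff_ne_zero.mp (Nat.lt_of_le_of_lt (Nat.zero_le _) h'))
    simp at h h'
    rw [pvGo_cons, pvGo_cons]
    by_cases hac : a = c <;> simp [hac]
    · exact ih f f' [] _ (by omega) (by omega)
    · exact ih f f' (a :: cur) acc (by omega) (by omega)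

theorem pvGo_acc (c : Char) (l : List Char) :
    ∀ (fuel : Nat) (cur : List Char) (acc : List (List Char)), l.length < fuel →
      PySem.Chars.splitOn.go [c] fuel l cur acc =
        acc.reverse ++ PySem.Chars.splitOn.go [c] fuel l cur [] := by
  induction l with
  | nil =>
    intro fuel cur acc h
    obtain ⟨f, rfl⟩ := Nat.exists_eq_succ_of_ne_zero (Nat.pos_iff_ne_zero.mp h)
    rw [pvGo_nil, pvGo_nil]; simp
  | cons a t ih =>
    intro fuel cur acc h
    obtain ⟨f, rfl⟩ := Nat.exists_eq_succ_of_ne_zero (Nat.pos_iff_ne_zero.mp (Nat.lt_of_le_of_lt (Nat.zero_le _) h))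
    simp at h
    rw [pvGo_cons, pvGo_cons]
    by_cases hac : a = c <;> simp [hac]
    · rw [ih f [] _ (by omega), ih f [] [cur.reverse] (by omega)]; simp
    · rw [ih f (a :: cur) acc (by omega)]

theorem pvSplitOn_no (c : Char) (s : List Char) (h : c ∉ s) :
    PySem.Chars.splitOn s [c] = [s] := by
  have key : ∀ (l : List Char) (fuel : Nat) (cur : List Char), c ∉ l → l.length < fuel →
      PySem.Chars.splitOn.go [c] fuel l cur [] = [cur.reverse ++ l] := by
    intro l
    induction l with
    | nil =>
      intro fuel cur _ hf
      obtain ⟨f, rfl⟩ := Nat.exists_eq_succ_of_ne_zero (Nat.pos_iff_ne_zero.mp hf)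
      rw [pvGo_nil]; simp
    | cons a t ih =>
      intro fuel cur hm hf
      obtain ⟨f, rfl⟩ := Nat.exists_eq_succ_of_ne_zero (Nat.pos_iff_ne_zero.mp (Nat.lt_of_le_of_lt (Nat.zero_le _) hf))
      simp at hf hm
      rw [pvGo_cons, if_neg (fun hh => hm.1 hh.symm), ih f (a :: cur) hm.2 (by omega)]
      simp
  rw [PySem.Chars.splitOn, key s (s.length + 1) [] h (by omega)]
  simp

theorem pvSplitOn_break (c : Char) (l r : List Char) (h : c ∉ l) :
    PySem.Chars.splitOn (l ++ c :: r) [c] = l :: PySem.Chars.splitOn r [c] := by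
  have key : ∀ (l : List Char) (fuel : Nat) (cur : List Char), c ∉ l →
      l.length + r.length + 1 < fuel →
      PySem.Chars.splitOn.go [c] fuel (l ++ c :: r) cur [] =
        (cur.reverse ++ l) :: PySem.Chars.splitOn r [c] := by
    intro l
    induction l with
    | nil =>
      intro fuel cur _ hf
      obtain ⟨f, rfl⟩ := Nat.exists_eq_succ_of_ne_zero (Nat.pos_iff_ne_zero.mp (Nat.lt_of_le_of_lt (Nat.zero_le _) hf))
      simp at hf
      rw [List.nil_append, pvGo_cons, if_pos rfl, pvGo_acc c r f [] [cur.reverse] (by omega)]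
      rw [PySem.Chars.splitOn, pvGo_fuel c r f (r.length + 1) [] [] (by omega) (by omega)]
      simp
    | cons a t ih =>
      intro fuel cur hm hf
      obtain ⟨f, rfl⟩ := Nat.exists_eq_succ_of_ne_zero (Nat.pos_iff_ne_zero.mp (Nat.lt_of_le_of_lt (Nat.zero_le _) hf))
      simp at hf hm
      rw [List.cons_append, pvGo_cons, if_neg (fun hh => hm.1 hh.symm), ih f (a :: cur) hm.2 (by omega)]
      simp
  rw [PySem.Chars.splitOn, key l _ [] h (by simp only [List.length_append, List.length_cons]; omega)]
  simp

theorem pvPeel (c : Char) (s : List Char) :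
    c ∉ s ∨ ∃ l r, s = l ++ c :: r ∧ c ∉ l := by
  induction s with
  | nil => left; simp
  | cons a t ih =>
    by_cases hac : a = c
    · right; exact ⟨[], t, by simp [hac], by simp⟩
    · rcases ih with hn | ⟨l, r, rfl, hl⟩
      · left; simp [hn]; exact fun h => hac h.symm
      · right; exact ⟨a :: l, r, by simp, by simp [hl]; exact fun h => hac h.symm⟩

theorem pvSplitOn_ne_nil (c : Char) (s : List Char) : PySem.Chars.splitOn s [c] ≠ [] := by
  rcases pvPeel c s with hn | ⟨l, r, rfl, hl⟩
  · rw [pvSplitOn_no c s hn]; simp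
  · rw [pvSplitOn_break c l r hl]; simp

theorem pvJoin_splitOn (c : Char) (s : List Char) :
    PySem.Chars.join [c] (PySem.Chars.splitOn s [c]) = s := by
  induction hn : s.length using Nat.strong_induction_on generalizing s with
  | _ n ih =>
  rcases pvPeel c s with hno | ⟨l, r, rfl, hl⟩
  · rw [pvSplitOn_no c s hno, PySem.Chars.join_singleton]
  · rw [pvSplitOn_break c l r hl]
    obtain ⟨x, t, hx⟩ : ∃ x t, PySem.Chars.splitOn r [c] = x :: t := by
      cases e : PySem.Chars.splitOn r [c] with
      | nil => exact absurd e (pvSplitOn_ne_nil c r)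
      | cons x t => exact ⟨x, t, rfl⟩
    have hr : PySem.Chars.join [c] (PySem.Chars.splitOn r [c]) = r :=
      ih r.length (by subst hn; simp only [List.length_append, List.length_cons]; omega) r rfl
    rw [hx, PySem.Chars.join_cons_cons, ← hx, hr]
    simp

-- ---------- find structure ----------

theorem pvFGo_nil (sub : List Char) (k : Nat) :
    PySem.Chars.find.go sub [] k = if sub.isEmpty then (k : Int) else -1 := by
  rw [PySem.Chars.find.go]

theorem pvFGo_cons (sub : List Char) (a : Char) (t : List Char) (k : Nat) :
    PySem.Chars.find.go sub (a :: t) k =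
      if sub.isPrefixOf (a :: t) then (k : Int) else PySem.Chars.find.go sub t (k + 1) := by
  rw [PySem.Chars.find.go]

theorem pvFindGo_shift (sub : List Char) (s : List Char) :
    ∀ (k : Nat), PySem.Chars.find.go sub s k =
      if PySem.Chars.find s sub = -1 then -1 else PySem.Chars.find s sub + k := by
  induction s with
  | nil =>
    intro k
    rw [PySem.Chars.find, pvFGo_nil, pvFGo_nil]
    by_cases h : sub.isEmpty <;> simp [h]
  | cons a t ih =>
    intro k
    rw [PySem.Chars.find, pvFGo_cons, pvFGo_cons]
    by_cases h : sub.isPrefixOf (a :: t) <;> simp only [h, if_true, if_false, Bool.false_eq_true]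
    · simp
    · rw [ih (k + 1), ih 1]
      have hn : -1 ≤ PySem.Chars.find t sub := PySem.Chars.neg_one_le_find t sub
      rw [PySem.Chars.find] at hn ⊢
      split_ifs with h1 h2 <;> push_cast <;> omega

theorem pvFind_cons (sub : List Char) (a : Char) (t : List Char) :
    PySem.Chars.find (a :: t) sub =
      if sub.isPrefixOf (a :: t) then 0
      else if PySem.Chars.find t sub = -1 then -1 else PySem.Chars.find t sub + 1 := by
  rw [PySem.Chars.find, pvFGo_cons]
  by_cases h : sub.isPrefixOf (a :: t) <;> simp only [h, if_true, if_false, Bool.false_eq_true]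
  · rfl
  · rw [pvFindGo_shift]; norm_num

theorem pvPrefix_break (c : Char) (pat l r : List Char) (hc : c ∉ pat)
    (h : pat <+: (l ++ c :: r)) : pat <+: l := by
  by_cases hlen : pat.length ≤ l.length
  · obtain ⟨u, hu⟩ := h
    refine ⟨l.drop pat.length, ?_⟩
    have h2 := congrArg (List.take pat.length) hu.symm
    rw [List.take_append_of_le_length hlen] at h2
    have h3 : List.take pat.length l = pat := by rw [h2]; simp
    conv_rhs => rw [← List.take_append_drop pat.length l]
    rw [h3]
  · exfalso
    obtain ⟨u, hu⟩ := h
    have : (pat ++ u)[l.length]? = some c := by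
      rw [hu]; simp
    rw [List.getElem?_append_left (by omega)] at this
    exact hc (List.mem_of_getElem? this)

theorem pvFind_in_left (c : Char) (pat l r : List Char) (hc : c ∉ pat) (hne : pat ≠ [])
    (hin : pat <:+: l) :
    PySem.Chars.find (l ++ c :: r) pat = PySem.Chars.find l pat := by
  induction l with
  | nil => simp at hin; exact absurd hin hne
  | cons a t ih =>
    rw [List.cons_append, pvFind_cons, pvFind_cons]
    by_cases hp : pat.isPrefixOf (a :: t)
    · rw [if_pos, if_pos hp]
      rw [List.isPrefixOf_iff_prefix] at hp ⊢
      exact hp.trans (List.prefix_append _ _)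
    · rw [if_neg, if_neg hp]
      · have htin : pat <:+: t := by
          rcases List.infix_cons_iff.mp hin with h1 | h1
          · exact absurd ((List.isPrefixOf_iff_prefix).mpr h1) hp
          · exact h1
        rw [ih htin]
      · intro hpp
        rw [List.isPrefixOf_iff_prefix] at hpp
        exact hp ((List.isPrefixOf_iff_prefix).mpr (pvPrefix_break c pat (a :: t) r hc hpp))

theorem pvFind_in_right (c : Char) (pat l r : List Char) (hc : c ∉ pat) (hne : pat ≠ [])
    (hnin : ¬ pat <:+: l) :
    PySem.Chars.find (l ++ c :: r) pat =
      if PySem.Chars.find r pat = -1 then -1 else (l.length : Int) + 1 + PySem.Chars.find r pat := by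
  induction l with
  | nil =>
    rw [List.nil_append, pvFind_cons]
    rw [if_neg]
    · have hn : -1 ≤ PySem.Chars.find r pat := PySem.Chars.neg_one_le_find r pat
      split_ifs with h1 <;> simp <;> omega
    · intro hpp
      rw [List.isPrefixOf_iff_prefix] at hpp
      have := pvPrefix_break c pat [] r hc hpp
      simp at this
      exact hne this
  | cons a t ih =>
    rw [List.cons_append, pvFind_cons]
    rw [if_neg]
    · have htnin : ¬ pat <:+: t := fun h => hnin (List.infix_cons_iff.mpr (Or.inr h))
      rw [ih htnin]
      have hn : -1 ≤ PySem.Chars.find r pat := PySem.Chars.neg_one_le_find r pat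
      have hlc : ((a :: t).length : Int) = (t.length : Int) + 1 := by
        simp only [List.length_cons]; push_cast; ring
      by_cases h1 : PySem.Chars.find r pat = -1
      · simp [h1]
      · rw [if_neg h1, if_neg (by omega), if_neg h1, hlc]; omega
    · intro hpp
      rw [List.isPrefixOf_iff_prefix] at hpp
      have := pvPrefix_break c pat (a :: t) r hc hpp
      exact hnin this.isInfix

theorem pvFind_char_break (c : Char) (w r : List Char) (h : c ∉ w) :
    PySem.Chars.find (w ++ c :: r) [c] = (w.length : Int) := by
  induction w with
  | nil =>
    rw [List.nil_append, pvFind_cons, if_pos]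
    · simp
    · simp [List.isPrefixOf]
  | cons a t ih =>
    simp only [List.mem_cons, not_or] at h
    rw [List.cons_append, pvFind_cons, if_neg (by simp [List.isPrefixOf]; exact fun hh => h.1 hh),
      ih h.2, if_neg (by omega)]
    simp only [List.length_cons]; push_cast; ring

theorem pvInfix_drop (pat s : List Char) : pat <:+: s ↔ ∃ j, pat <+: s.drop j := by
  constructor
  · intro h
    have := (PySem.Chars.isIn_iff_infix pat s).mpr h
    exact (PySem.Chars.exists_prefix_drop_iff_isIn pat s).mpr this
  · intro h
    exact (PySem.Chars.isIn_iff_infix pat s).mp ((PySem.Chars.exists_prefix_drop_iff_isIn pat s).mp h)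

theorem pvFind_occ (pat s : List Char) (hne : pat ≠ []) (h : pat <:+: s) :
    0 ≤ PySem.Chars.find s pat ∧
    (PySem.Chars.find s pat).toNat + pat.length ≤ s.length := by
  have h0 : 0 ≤ PySem.Chars.find s pat := (PySem.Chars.find_nonneg_iff s pat).mpr h
  refine ⟨h0, ?_⟩
  have hsp := (PySem.Chars.find_spec (s := s) (sub := pat) h0).1
  have hlen := hsp.length_le
  rw [List.length_drop] at hlen
  have hle := PySem.Chars.find_le_length s pat
  have hp : 0 < pat.length := List.length_pos_iff.mpr hne
  omega

theorem pvSingleton_infix (c : Char) (w : List Char) : [c] <:+: w ↔ c ∈ w := by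
  constructor
  · intro h
    exact List.singleton_sublist.mp h.sublist
  · intro h
    obtain ⟨l1, l2, rfl⟩ := List.append_of_mem h
    exact ⟨l1, l2, by simp⟩

theorem pvInfix_break (c : Char) (pat l r : List Char) (hc : c ∉ pat) :
    pat <:+: (l ++ c :: r) ↔ pat <:+: l ∨ pat <:+: r := by
  constructor
  · intro h
    obtain ⟨j, hj⟩ := (pvInfix_drop pat _).mp h
    rw [List.drop_append] at hj
    by_cases hjl : j ≤ l.length
    · left
      rw [show j - l.length = 0 by omega, List.drop_zero] at hj
      exact ((pvInfix_drop pat l).mpr ⟨j, pvPrefix_break c pat (l.drop j) r hc hj⟩)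
    · right
      rw [List.drop_eq_nil_of_le (by omega), List.nil_append] at hj
      cases hd : List.drop (j - l.length) (c :: r) with
      | nil => rw [hd] at hj; simp at hj; subst hj; exact List.nil_infix
      | cons x xs =>
        rw [hd] at hj
        have : List.drop (j - l.length) (c :: r) = List.drop (j - l.length - 1) r := by
          cases hjj : j - l.length with
          | zero => omega
          | succ m => rw [List.drop_succ_cons, Nat.add_sub_cancel]
        exact (pvInfix_drop pat r).mpr ⟨j - l.length - 1, by rw [← this, hd]; exact hj⟩
  · intro h
    rcases h with h | h
    · exact h.trans ⟨[], c :: r, by simp⟩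
    · exact h.trans ⟨l ++ [c], [], by simp⟩

-- ---------- rfind structure ----------

theorem pvRGo_zero (s sub : List Char) :
    PySem.Chars.rfind.go s sub 0 = if sub.isPrefixOf s then 0 else -1 := by
  rw [PySem.Chars.rfind.go]

theorem pvRGo_succ (s sub : List Char) (j : Nat) :
    PySem.Chars.rfind.go s sub (j + 1) =
      if sub.isPrefixOf (s.drop (j + 1)) then ((j : Int) + 1) else PySem.Chars.rfind.go s sub j := by
  rw [PySem.Chars.rfind.go]
  by_cases h : sub.isPrefixOf (s.drop (j + 1)) <;> simp [h]

theorem pvSingletonPrefix (c : Char) (w : List Char) :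
    [c].isPrefixOf w = true ↔ ∃ t, w = c :: t := by
  rw [List.isPrefixOf_iff_prefix]
  constructor
  · rintro ⟨u, rfl⟩; exact ⟨u, rfl⟩
  · rintro ⟨t, rfl⟩; exact ⟨t, rfl⟩

theorem pvRfind_no (c : Char) (z : List Char) (h : c ∉ z) :
    ∀ j, PySem.Chars.rfind.go z [c] j = -1 := by
  intro j
  induction j with
  | zero =>
    rw [pvRGo_zero, if_neg]
    intro hp
    obtain ⟨t, ht⟩ := (pvSingletonPrefix c z).mp hp
    exact h (ht ▸ List.mem_cons_self)
  | succ j ih =>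
    rw [pvRGo_succ, if_neg, ih]
    intro hp
    obtain ⟨t, ht⟩ := (pvSingletonPrefix c _).mp hp
    exact h (List.mem_of_mem_drop (ht ▸ List.mem_cons_self))

theorem pvRfind_none (c : Char) (z : List Char) (h : c ∉ z) :
    PySem.Chars.rfind z [c] = -1 := by
  rw [PySem.Chars.rfind]; exact pvRfind_no c z h _

theorem pvRfind_goto (c : Char) (x y : List Char) :
    PySem.Chars.rfind.go (x ++ c :: y) [c] x.length = (x.length : Int) := by
  cases hx : x.length with
  | zero =>
    have : x = [] := List.length_eq_zero_iff.mp hx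
    subst this
    rw [pvRGo_zero]
    simp only [List.nil_append]
    rw [if_pos ((pvSingletonPrefix c _).mpr ⟨y, rfl⟩)]
    simp
  | succ m =>
    have hd : (x ++ c :: y).drop (m + 1) = c :: y := by
      rw [← hx, show x.length = x.length + 0 from rfl,
        show x ++ c :: y = x ++ (c :: y) from rfl, List.drop_append]
      simp
    rw [pvRGo_succ, hd, if_pos ((pvSingletonPrefix c _).mpr ⟨y, rfl⟩)]
    exact_mod_cast rfl

theorem pvRfind_break (c : Char) (x y : List Char) :
    PySem.Chars.rfind (x ++ c :: y) [c] = (x.length : Int) + 1 + PySem.Chars.rfind y [c] := by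
  have key : ∀ m, m ≤ y.length →
      PySem.Chars.rfind.go (x ++ c :: y) [c] (x.length + 1 + m) =
        (x.length : Int) + 1 + PySem.Chars.rfind.go y [c] m := by
    intro m
    induction m with
    | zero =>
      intro _
      have hd : (x ++ c :: y).drop (x.length + 1) = y := by
        rw [show x ++ c :: y = (x ++ [c]) ++ y by simp,
          show x.length + 1 = (x ++ [c]).length + 0 by simp, List.drop_append]
        simp
      rw [show x.length + 1 + 0 = x.length + 1 from rfl, pvRGo_succ, hd, pvRGo_zero]
      by_cases hy : ([c]).isPrefixOf y
      · rw [if_pos hy, if_pos hy]; push_cast; ring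
      · rw [if_neg hy, if_neg hy, pvRfind_goto]; ring
    | succ m ih =>
      intro hm
      have hd : (x ++ c :: y).drop (x.length + 1 + m + 1) = y.drop (m + 1) := by
        rw [show x ++ c :: y = (x ++ [c]) ++ y by simp,
          show x.length + 1 + m + 1 = (x ++ [c]).length + (m + 1) by simp; ring, List.drop_append]
        simp
      rw [show x.length + 1 + (m + 1) = (x.length + 1 + m) + 1 by ring, pvRGo_succ, hd, pvRGo_succ]
      by_cases h : ([c]).isPrefixOf (y.drop (m + 1))
      · rw [if_pos h, if_pos h]; push_cast; ring
      · rw [if_neg h, if_neg h, ih (by omega)]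
  rw [PySem.Chars.rfind, PySem.Chars.rfind,
    show (x ++ c :: y).length = x.length + 1 + y.length by
      simp only [List.length_append, List.length_cons]; omega,
    key y.length le_rfl]

theorem pvRGo_bounds (c : Char) (z : List Char) :
    ∀ j, PySem.Chars.rfind.go z [c] j = -1 ∨
      (0 ≤ PySem.Chars.rfind.go z [c] j ∧ (PySem.Chars.rfind.go z [c] j).toNat < z.length ∧
        (PySem.Chars.rfind.go z [c] j).toNat ≤ j) := by
  intro j
  induction j with
  | zero =>
    rw [pvRGo_zero]
    by_cases h : ([c]).isPrefixOf z <;> simp [h]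
    obtain ⟨t, rfl⟩ := (pvSingletonPrefix c z).mp h
    simp
  | succ j ih =>
    rw [pvRGo_succ]
    by_cases h : ([c]).isPrefixOf (z.drop (j + 1)) <;> simp only [h, if_true, if_false, Bool.false_eq_true]
    · right
      obtain ⟨t, ht⟩ := (pvSingletonPrefix c _).mp h
      have : j + 1 < z.length := by
        by_contra hh
        rw [List.drop_eq_nil_of_le (by omega)] at ht
        simp at ht
      refine ⟨by positivity, ?_, ?_⟩ <;> omega
    · rcases ih with h1 | h1
      · left; exact h1
      · right; exact ⟨h1.1, h1.2.1, by omega⟩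

theorem pvRfind_bounds (c : Char) (z : List Char) :
    PySem.Chars.rfind z [c] = -1 ∨
      (0 ≤ PySem.Chars.rfind z [c] ∧ (PySem.Chars.rfind z [c]).toNat < z.length) := by
  rw [PySem.Chars.rfind]
  rcases pvRGo_bounds c z z.length with h | h
  · left; exact h
  · right; exact ⟨h.1, h.2.1⟩

theorem pvRfindFrom_zero (s sub : List Char) (k : Nat) (hk : k ≤ s.length) :
    PySem.Chars.rfindFrom s sub 0 (some (k : Int)) = PySem.Chars.rfind (s.take k) sub := by
  rw [PySem.Chars.rfindFrom]
  have h1 : ¬ ((s.length : Int) < (k : Int)) := by exact_mod_cast not_lt.mpr hk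
  have h2 : ¬ ((k : Int) < 0) := not_lt.mpr (by positivity)
  simp only [h1, ↓reduceIte, h2, lt_self_iff_false, Int.toNat_zero, Int.toNat_natCast,
    List.drop_zero, Int.reduceNeg, zero_add, ite_eq_right_iff]
  intro h
  exact h.symm

-- ---------- A reduced to locate-then-drop over lines ----------
theorem pvFindStartA_eq (ls : List (List Char)) (n : Int) :
    pvFindStartA (PySem.List.enumerate ls n)
      = (ls.findIdx? pvHdr).map (fun (k : Nat) => n + (k : Int)) := by
  induction ls generalizing n with
  | nil => simp [pvFindStartA, PySem.List.enumerate_nil]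
  | cons l rest ih =>
    rw [PySem.List.enumerate_cons, List.findIdx?_cons]
    by_cases h : pvHdr l
    · rw [pvFindStartA, if_pos (by simpa [pvHdr] using h), if_pos h]
      simp
    · rw [pvFindStartA, if_neg (by simpa [pvHdr] using h), if_neg h, ih]
      cases rest.findIdx? pvHdr
      · simp
      · simp
        omega

theorem pvReportLoopA_true (ls acc : List (List Char)) :
    pvReportLoopA ls (acc, true) = (acc ++ ls, true) := by
  induction ls generalizing acc with
  | nil => simp [pvReportLoopA]
  | cons l rest ih => simp [pvReportLoopA, ih]

theorem pvReportLoopA_spec (ls : List (List Char)) :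
    pvReportLoopA ls ([], false)
      = match ls.findIdx? pvSep with
        | none => ([], false)
        | some k => (ls.drop (k + 1), true) := by
  induction ls with
  | nil => simp [pvReportLoopA]
  | cons l rest ih =>
    rw [List.findIdx?_cons, pvReportLoopA]
    by_cases h : pvSep l
    · rw [if_pos (by simpa [pvSep] using h), if_pos h, pvReportLoopA_true]
      simp
    · rw [if_neg (by simpa [pvSep] using h), if_neg h, if_neg (by simp), ih]
      cases rest.findIdx? pvSep <;> simp

-- occurrences of a newline-free pattern are occurrences in single lines
theorem pvInfix_lines (c : Char) (pat : List Char) (hc : c ∉ pat) (s : List Char) :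
    pat <:+: s ↔ ∃ line ∈ PySem.Chars.splitOn s [c], pat <:+: line := by
  induction hn : s.length using Nat.strong_induction_on generalizing s with
  | _ n ih =>
  rcases pvPeel c s with hno | ⟨l, r, rfl, hl⟩
  · rw [pvSplitOn_no c s hno]
    simp
  · rw [pvSplitOn_break c l r hl, pvInfix_break c pat l r hc,
      ih r.length (by subst hn; simp only [List.length_append, List.length_cons]; omega) r rfl]
    simp only [List.mem_cons]
    constructor
    · rintro (h | ⟨line, h1, h2⟩)
      · exact ⟨l, Or.inl rfl, h⟩
      · exact ⟨line, Or.inr h1, h2⟩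
    · rintro ⟨line, h1 | h1, h2⟩
      · subst h1; exact Or.inl h2
      · exact Or.inr ⟨line, h1, h2⟩

theorem pvHdr_eq_false (line : List Char) :
    pvHdr line = false ↔
      ¬ "FINAL REPORT".toList <:+: line ∧ ¬ "Final Report".toList <:+: line := by
  rw [pvHdr, Bool.or_eq_false_iff, PySem.Chars.isIn_eq_false_iff, PySem.Chars.isIn_eq_false_iff]

theorem pvHdr_none (s : List Char) :
    (PySem.Chars.splitOn s ['\n']).findIdx? pvHdr = none ↔
      (PySem.Chars.find s "FINAL REPORT".toList = -1 ∧
       PySem.Chars.find s "Final Report".toList = -1) := by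
  rw [List.findIdx?_eq_none_iff]
  rw [PySem.Chars.find_eq_neg_one_iff, PySem.Chars.find_eq_neg_one_iff]
  rw [pvInfix_lines '\n' _ (by decide) s, pvInfix_lines '\n' _ (by decide) s]
  constructor
  · intro h
    constructor
    · rintro ⟨line, h1, h2⟩
      exact ((pvHdr_eq_false line).mp (h line h1)).1 h2
    · rintro ⟨line, h1, h2⟩
      exact ((pvHdr_eq_false line).mp (h line h1)).2 h2
  · rintro ⟨h1, h2⟩ line hline
    rw [pvHdr_eq_false]
    exact ⟨fun h => h1 ⟨line, hline, h⟩, fun h => h2 ⟨line, hline, h⟩⟩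

-- small helpers
theorem pvStrip_nil : PySem.Chars.strip [] = [] := by
  simp [PySem.Chars.strip, PySem.Chars.lstrip, PySem.Chars.rstrip]

theorem pvATail_cons (l : List Char) (L : List (List Char)) (h : pvSep l = false) :
    pvATail (l :: L) = pvATail L := by
  rw [pvATail, pvATail, List.findIdx?_cons, h]
  cases hL : L.findIdx? pvSep with
  | none => simp
  | some j => simp

theorem pvDrop_append_big (x r : List Char) (k : Nat) :
    (x ++ r).drop (x.length + k) = r.drop k := by
  rw [List.drop_append]
  simp

theorem pvFind_ne_cast (s sub : List Char) (h : PySem.Chars.find s sub ≠ -1) :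
    PySem.Chars.find s sub = ((PySem.Chars.find s sub).toNat : Int) ∧
      (PySem.Chars.find s sub).toNat ≤ s.length := by
  have h1 := PySem.Chars.neg_one_le_find s sub
  have h2 := PySem.Chars.find_le_length s sub
  constructor
  · rw [Int.toNat_of_nonneg (by omega)]
  · omega

theorem pvBTail_shift (x r : List Char) (ls : Int) (h0 : 0 ≤ ls) (hr : ls ≤ r.length) :
    pvBTail (x ++ r) ((x.length : Int) + ls) = pvBTail r ls := by
  have hls : ls = (ls.toNat : Int) := (Int.toNat_of_nonneg h0).symm
  rw [pvBTail, pvBTail]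
  rw [hls, show (x.length : Int) + (ls.toNat : Int) = ((x.length + ls.toNat : Nat) : Int) by push_cast; ring]
  have hk1 : x.length + ls.toNat ≤ (x ++ r).length := by simp; omega
  have hk2 : ls.toNat ≤ r.length := by omega
  rw [PySem.Chars.findFrom_natCast (x ++ r) "====================".toList (x.length + ls.toNat) hk1,
      PySem.Chars.findFrom_natCast r "====================".toList ls.toNat hk2, pvDrop_append_big]
  by_cases hf : PySem.Chars.find (r.drop ls.toNat) "====================".toList = -1
  · rw [if_pos hf, if_pos hf]
    simp
  · rw [if_neg hf, if_neg hf]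
    obtain ⟨hc1, hc2⟩ := pvFind_ne_cast _ _ hf
    rw [List.length_drop] at hc2
    have hne1 : ¬(((x.length + ls.toNat : Nat) : Int) +
        PySem.Chars.find (r.drop ls.toNat) "====================".toList = -1) := by omega
    have hne2 : ¬(((ls.toNat : Nat) : Int) +
        PySem.Chars.find (r.drop ls.toNat) "====================".toList = -1) := by omega
    rw [if_neg hne1, if_neg hne2, hc1]
    set fn := (PySem.Chars.find (r.drop ls.toNat) "====================".toList).toNat with hfn
    rw [show ((x.length + ls.toNat : Nat) : Int) + (fn : Int) = ((x.length + (ls.toNat + fn) : Nat) : Int) by push_cast; ring,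
        show ((ls.toNat : Nat) : Int) + (fn : Int) = ((ls.toNat + fn : Nat) : Int) by push_cast; ring]
    have hk3 : x.length + (ls.toNat + fn) ≤ (x ++ r).length := by simp; omega
    have hk4 : ls.toNat + fn ≤ r.length := by omega
    rw [PySem.Chars.findFrom_natCast (x ++ r) ['\n'] (x.length + (ls.toNat + fn)) hk3,
        PySem.Chars.findFrom_natCast r ['\n'] (ls.toNat + fn) hk4, pvDrop_append_big]
    by_cases hd : PySem.Chars.find (r.drop (ls.toNat + fn)) ['\n'] = -1
    · rw [if_pos hd, if_pos hd]
      simp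
    · rw [if_neg hd, if_neg hd]
      obtain ⟨hd1, hd2⟩ := pvFind_ne_cast _ _ hd
      rw [List.length_drop] at hd2
      have hne3 : ¬(((x.length + (ls.toNat + fn) : Nat) : Int) +
          PySem.Chars.find (r.drop (ls.toNat + fn)) ['\n'] = -1) := by omega
      have hne4 : ¬(((ls.toNat + fn : Nat) : Int) +
          PySem.Chars.find (r.drop (ls.toNat + fn)) ['\n'] = -1) := by omega
      rw [if_neg hne3, if_neg hne4, hd1]
      set dn := (PySem.Chars.find (r.drop (ls.toNat + fn)) ['\n']).toNat with hdn
      rw [PySem.List.slice_from _ (by positivity), PySem.List.slice_from _ (by positivity)]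
      congr 1
      rw [show (((x.length + (ls.toNat + fn) : Nat) : Int) + (dn : Int) + 1).toNat = x.length + (ls.toNat + fn + dn + 1) by omega,
          show (((ls.toNat + fn : Nat) : Int) + (dn : Int) + 1).toNat = ls.toNat + fn + dn + 1 by omega,
          pvDrop_append_big]

-- skipping a separator-free first line does not change B's tail value
theorem pvBTail_skip (l r : List Char) (hns : ¬ "====================".toList <:+: l) :
    pvBTail (l ++ '\n' :: r) 0 = pvBTail r 0 := by
  rw [pvBTail, pvBTail, PySem.Chars.findFrom_zero, PySem.Chars.findFrom_zero,
    pvFind_in_right '\n' _ l r (by decide) (by decide) hns]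
  by_cases hf : PySem.Chars.find r "====================".toList = -1
  · rw [if_pos hf, if_pos hf]
    norm_num
  · rw [if_neg hf, if_neg hf]
    obtain ⟨hc1, hc2⟩ := pvFind_ne_cast _ _ hf
    have hne1 : ¬((l.length : Int) + 1 + PySem.Chars.find r "====================".toList = -1) := by omega
    rw [if_neg hne1]
    rw [hc1]
    set fn := (PySem.Chars.find r "====================".toList).toNat with hfn
    rw [show (l.length : Int) + 1 + (fn : Int) = ((l.length + 1 + fn : Nat) : Int) by push_cast; ring]
    have hk1 : l.length + 1 + fn ≤ (l ++ '\n' :: r).length := by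
      simp only [List.length_append, List.length_cons]; omega
    have hdrop : (l ++ '\n' :: r).drop (l.length + 1 + fn) = r.drop fn := by
      rw [show l ++ '\n' :: r = (l ++ ['\n']) ++ r by simp,
        show l.length + 1 + fn = (l ++ ['\n']).length + fn by simp, pvDrop_append_big]
    rw [PySem.Chars.findFrom_natCast _ ['\n'] (l.length + 1 + fn) hk1,
        PySem.Chars.findFrom_natCast r ['\n'] fn hc2, hdrop]
    by_cases hd : PySem.Chars.find (r.drop fn) ['\n'] = -1
    · rw [if_pos hd, if_pos hd]
      simp
    · rw [if_neg hd, if_neg hd]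
      obtain ⟨hd1, hd2⟩ := pvFind_ne_cast _ _ hd
      rw [List.length_drop] at hd2
      have hne3 : ¬(((l.length + 1 + fn : Nat) : Int) + PySem.Chars.find (r.drop fn) ['\n'] = -1) := by omega
      have hne4 : ¬(((fn : Nat) : Int) + PySem.Chars.find (r.drop fn) ['\n'] = -1) := by omega
      rw [if_neg hne3, if_neg hne4, hd1]
      set dn := (PySem.Chars.find (r.drop fn) ['\n']).toNat with hdn
      rw [PySem.List.slice_from _ (by positivity), PySem.List.slice_from _ (by positivity)]
      congr 1
      rw [show (((l.length + 1 + fn : Nat) : Int) + (dn : Int) + 1).toNat = (l ++ ['\n']).length + (fn + dn + 1) by simp; omega,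
          show (((fn : Nat) : Int) + (dn : Int) + 1).toNat = fn + dn + 1 by omega,
          show l ++ '\n' :: r = (l ++ ['\n']) ++ r by simp, pvDrop_append_big]
-- ---------- Stage II: tails agree ----------
theorem pvTail_eq (suf : List Char) :
    pvATail (PySem.Chars.splitOn suf ['\n']) = pvBTail suf 0 := by
  induction hn : suf.length using Nat.strong_induction_on generalizing suf with
  | _ n ih =>
  rcases pvPeel '\n' suf with hno | ⟨l, r, rfl, hl⟩
  · rw [pvSplitOn_no _ _ hno, pvATail]
    by_cases hs : pvSep suf
    · rw [show [suf].findIdx? pvSep = some 0 by rw [List.findIdx?_cons, hs]; rfl]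
      simp only [List.drop_succ_cons, List.drop_nil, PySem.Chars.join_nil, pvStrip_nil]
      have hinf : "====================".toList <:+: suf := (PySem.Chars.isIn_iff_infix _ _).mp hs
      have hf : PySem.Chars.find suf "====================".toList ≠ -1 :=
        (PySem.Chars.find_ne_neg_one_iff _ _).mpr hinf
      rw [pvBTail, PySem.Chars.findFrom_zero, if_neg hf]
      obtain ⟨hc1, hc2⟩ := pvFind_ne_cast _ _ hf
      rw [hc1, PySem.Chars.findFrom_natCast suf ['\n'] _ hc2]
      have hnl : PySem.Chars.find
          (suf.drop (PySem.Chars.find suf "====================".toList).toNat) ['\n'] = -1 := by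
        rw [PySem.Chars.find_eq_neg_one_iff]
        intro h
        exact hno (List.mem_of_mem_drop ((pvSingleton_infix '\n' _).mp h))
      rw [hnl, if_pos rfl, if_pos rfl]
    · rw [show [suf].findIdx? pvSep = none by rw [List.findIdx?_cons, Bool.eq_false_iff.mpr hs, List.findIdx?_nil]; rfl]
      have hf : PySem.Chars.find suf "====================".toList = -1 := by
        rw [PySem.Chars.find_eq_neg_one_iff]
        intro h
        exact hs ((PySem.Chars.isIn_iff_infix _ _).mpr h)
      rw [pvBTail, PySem.Chars.findFrom_zero, if_pos hf]
  · rw [pvSplitOn_break _ _ _ hl]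
    by_cases hs : pvSep l
    · rw [pvATail, show (l :: PySem.Chars.splitOn r ['\n']).findIdx? pvSep = some 0 by
        rw [List.findIdx?_cons, hs]; rfl]
      simp only [List.drop_succ_cons, List.drop_zero]
      rw [pvJoin_splitOn]
      have hinf : "====================".toList <:+: l := (PySem.Chars.isIn_iff_infix _ _).mp hs
      rw [pvBTail, PySem.Chars.findFrom_zero,
        pvFind_in_left '\n' "====================".toList l r (by decide) (by decide) hinf]
      obtain ⟨h0, hocc⟩ := pvFind_occ _ l (by decide) hinf
      have hf : PySem.Chars.find l "====================".toList ≠ -1 := by omega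
      rw [if_neg hf]
      obtain ⟨hc1, _⟩ := pvFind_ne_cast _ _ hf
      set fn := (PySem.Chars.find l "====================".toList).toNat with hfn
      have hfl : fn ≤ l.length := by simp [hfn] at hocc ⊢; omega
      rw [hc1, PySem.Chars.findFrom_natCast (l ++ '\n' :: r) ['\n'] fn
        (by simp only [List.length_append, List.length_cons]; omega)]
      have hdrop : (l ++ '\n' :: r).drop fn = l.drop fn ++ '\n' :: r := by
        rw [List.drop_append, show fn - l.length = 0 by omega, List.drop_zero]
      have hnl : PySem.Chars.find ((l ++ '\n' :: r).drop fn) ['\n'] = ((l.length - fn : Nat) : Int) := by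
        rw [hdrop, pvFind_char_break '\n' _ r (fun hm => hl (List.mem_of_mem_drop hm)), List.length_drop]
      rw [hnl, if_neg (by omega), if_neg (by omega)]
      rw [PySem.List.slice_from _ (by positivity)]
      congr 1
      rw [show ((fn : Int) + ((l.length - fn : Nat) : Int) + 1).toNat = (l ++ ['\n']).length + 0 by
            simp only [List.length_append, List.length_singleton]; omega,
          show l ++ '\n' :: r = (l ++ ['\n']) ++ r by simp, pvDrop_append_big, List.drop_zero]
    · rw [pvATail_cons l _ (Bool.eq_false_iff.mpr hs),
        ih r.length (by subst hn; simp only [List.length_append, List.length_cons]; omega) r rfl,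
        pvBTail_skip l r (fun h => hs ((PySem.Chars.isIn_iff_infix _ _).mpr h))]

-- ---------- Stage I / main ----------
theorem pvPos_bounds (p1 p2 : Int) (n : Int) (h1 : -1 ≤ p1) (h2 : -1 ≤ p2)
    (hl1 : p1 ≤ n) (hl2 : p2 ≤ n) (hh : ¬ (p1 = -1 ∧ p2 = -1)) :
    0 ≤ pvPos p1 p2 ∧ pvPos p1 p2 ≤ n := by
  unfold pvPos; split_ifs <;> omega

theorem pvPos_le_left (p1 p2 : Int) (h2 : -1 ≤ p2) (h : p1 ≠ -1) : pvPos p1 p2 ≤ p1 := by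
  unfold pvPos; split_ifs <;> omega

theorem pvPos_le_right (p1 p2 : Int) (h1 : -1 ≤ p1) (h : p2 ≠ -1) : pvPos p1 p2 ≤ p2 := by
  unfold pvPos; split_ifs <;> omega

theorem pvPos_shift (p1r p2r L1 : Int) (hL : 0 ≤ L1) (h1 : -1 ≤ p1r) (h2 : -1 ≤ p2r)
    (hh : ¬ (p1r = -1 ∧ p2r = -1)) :
    pvPos (if p1r = -1 then -1 else L1 + p1r) (if p2r = -1 then -1 else L1 + p2r)
      = L1 + pvPos p1r p2r := by
  unfold pvPos; split_ifs <;> omega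

theorem pvMain (s : List Char)
    (hh : ¬ (PySem.Chars.find s "FINAL REPORT".toList = -1 ∧
             PySem.Chars.find s "Final Report".toList = -1)) :
    pvATail ((PySem.Chars.splitOn s ['\n']).drop
        (((PySem.Chars.splitOn s ['\n']).findIdx? pvHdr).getD 0))
      = pvBTail s (PySem.Chars.rfindFrom s ['\n'] 0
          (some (pvPos (PySem.Chars.find s "FINAL REPORT".toList)
                        (PySem.Chars.find s "Final Report".toList))) + 1) := by
  induction hn : s.length using Nat.strong_induction_on generalizing s with
  | _ n ih =>
  have hg1 := PySem.Chars.neg_one_le_find s "FINAL REPORT".toList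
  have hg2 := PySem.Chars.neg_one_le_find s "Final Report".toList
  have hl1 := PySem.Chars.find_le_length s "FINAL REPORT".toList
  have hl2 := PySem.Chars.find_le_length s "Final Report".toList
  obtain ⟨hp0, hpn⟩ := pvPos_bounds _ _ _ hg1 hg2 hl1 hl2 hh
  set pos := pvPos (PySem.Chars.find s "FINAL REPORT".toList)
                   (PySem.Chars.find s "Final Report".toList) with hposdef
  have hptn : pos = ((pos.toNat : Nat) : Int) := by omega
  have hptle : pos.toNat ≤ s.length := by omega
  rcases pvPeel '\n' s with hno | ⟨l, r, hsplit, hl⟩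
  · -- no newline at all: the only line is s itself, and the line start is 0
    have hhdr : pvHdr s = true := by
      rw [pvHdr, Bool.or_eq_true]
      by_cases h1 : PySem.Chars.find s "FINAL REPORT".toList = -1
      · right
        exact (PySem.Chars.isIn_iff_infix _ _).mpr
          ((PySem.Chars.find_ne_neg_one_iff _ _).mp (fun h => hh ⟨h1, h⟩))
      · left
        exact (PySem.Chars.isIn_iff_infix _ _).mpr ((PySem.Chars.find_ne_neg_one_iff _ _).mp h1)
    rw [pvSplitOn_no _ _ hno, show List.findIdx? pvHdr [s] = some 0 by
        rw [List.findIdx?_cons, hhdr]; rfl]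
    simp only [Option.getD_some, List.drop_zero]
    rw [hptn, pvRfindFrom_zero s ['\n'] pos.toNat hptle,
      pvRfind_none '\n' _ (fun hm => hno (List.mem_of_mem_take hm)),
      show (-1 : Int) + 1 = 0 by norm_num, ← pvTail_eq, pvSplitOn_no _ _ hno]
  · subst hsplit
    by_cases hhl : pvHdr l
    · -- the header is in the first line l: start index 0, line start 0
      rw [pvSplitOn_break _ _ _ hl, show List.findIdx? pvHdr (l :: PySem.Chars.splitOn r ['\n']) = some 0 by
          rw [List.findIdx?_cons, hhl]; rfl]
      simp only [Option.getD_some, List.drop_zero]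
      have hposl : pos < (l.length : Int) := by
        rw [pvHdr, Bool.or_eq_true] at hhl
        rcases hhl with h | h
        · have hinf := (PySem.Chars.isIn_iff_infix _ _).mp h
          have heq := pvFind_in_left '\n' "FINAL REPORT".toList l r (by decide) (by decide) hinf
          obtain ⟨hf0, hfocc⟩ := pvFind_occ "FINAL REPORT".toList l (by decide) hinf
          have hle := pvPos_le_left (PySem.Chars.find (l ++ '\n' :: r) "FINAL REPORT".toList)
            (PySem.Chars.find (l ++ '\n' :: r) "Final Report".toList) hg2 (by rw [heq]; omega)
          rw [← hposdef, heq] at hle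
          have : "FINAL REPORT".toList.length = 12 := by decide
          omega
        · have hinf := (PySem.Chars.isIn_iff_infix _ _).mp h
          have heq := pvFind_in_left '\n' "Final Report".toList l r (by decide) (by decide) hinf
          obtain ⟨hf0, hfocc⟩ := pvFind_occ "Final Report".toList l (by decide) hinf
          have hle := pvPos_le_right (PySem.Chars.find (l ++ '\n' :: r) "FINAL REPORT".toList)
            (PySem.Chars.find (l ++ '\n' :: r) "Final Report".toList) hg1 (by rw [heq]; omega)
          rw [← hposdef, heq] at hle
          have : "Final Report".toList.length = 12 := by decide
          omega
      have htake : (l ++ '\n' :: r).take pos.toNat = l.take pos.toNat :=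
        List.take_append_of_le_length (by omega)
      rw [hptn, pvRfindFrom_zero _ ['\n'] pos.toNat hptle, htake,
        pvRfind_none '\n' _ (fun hm => hl (List.mem_of_mem_take hm)),
        show (-1 : Int) + 1 = 0 by norm_num, ← pvTail_eq, pvSplitOn_break _ _ _ hl]
    · -- the header is further down: recurse on r
      have hhlf := (pvHdr_eq_false l).mp (Bool.eq_false_iff.mpr hhl)
      have heq1 := pvFind_in_right '\n' "FINAL REPORT".toList l r (by decide) (by decide) hhlf.1
      have heq2 := pvFind_in_right '\n' "Final Report".toList l r (by decide) (by decide) hhlf.2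
      have hg1r := PySem.Chars.neg_one_le_find r "FINAL REPORT".toList
      have hg2r := PySem.Chars.neg_one_le_find r "Final Report".toList
      have hl1r := PySem.Chars.find_le_length r "FINAL REPORT".toList
      have hl2r := PySem.Chars.find_le_length r "Final Report".toList
      have hhr : ¬ (PySem.Chars.find r "FINAL REPORT".toList = -1 ∧
                    PySem.Chars.find r "Final Report".toList = -1) := by
        rintro ⟨e1, e2⟩
        exact hh ⟨by rw [heq1, if_pos e1], by rw [heq2, if_pos e2]⟩
      obtain ⟨hp0r, hpnr⟩ := pvPos_bounds _ _ _ hg1r hg2r hl1r hl2r hhr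
      set posr := pvPos (PySem.Chars.find r "FINAL REPORT".toList)
                        (PySem.Chars.find r "Final Report".toList) with hposrdef
      -- pos over s is the shifted pos over r
      have hshift : pos = (l.length : Int) + 1 + posr := by
        rw [hposdef, heq1, heq2, hposrdef, pvPos_shift _ _ _ (by positivity) hg1r hg2r hhr]
      -- the line list and its header index
      rw [pvSplitOn_break _ _ _ hl, List.findIdx?_cons, Bool.eq_false_iff.mpr hhl]
      cases hfr : List.findIdx? pvHdr (PySem.Chars.splitOn r ['\n']) with
      | none => exact absurd ((pvHdr_none r).mp hfr) hhr
      | some ir =>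
        simp only [Bool.false_eq_true, if_false, Option.map_some, Option.getD_some, List.drop_succ_cons]
        -- left side is the IH's left side for r
        have hA := ih r.length (by subst hn; simp only [List.length_append, List.length_cons]; omega) r hhr rfl
        rw [hfr, Option.getD_some] at hA
        rw [hA, ← hposrdef]
        -- the r-side line start
        have hposrtn : posr = ((posr.toNat : Nat) : Int) := by omega
        have hposrle : posr.toNat ≤ r.length := by omega
        rw [hposrtn, pvRfindFrom_zero r ['\n'] posr.toNat hposrle]
        -- the s-side line start: shifted by l.length + 1
        have htake : (l ++ '\n' :: r).take pos.toNat = (l ++ ['\n']) ++ r.take posr.toNat := by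
          rw [show l ++ '\n' :: r = (l ++ ['\n']) ++ r by simp,
            show pos.toNat = (l ++ ['\n']).length + posr.toNat by
              simp only [List.length_append, List.length_singleton]; omega,
            List.take_append,
            List.take_of_length_le (by simp only [List.length_append, List.length_singleton]; omega)]
          simp
        rw [hptn, pvRfindFrom_zero _ ['\n'] pos.toNat hptle, htake,
          show (l ++ ['\n']) ++ r.take posr.toNat = l ++ '\n' :: r.take posr.toNat by simp,
          pvRfind_break '\n' l (r.take posr.toNat)]
        -- bounds for the r-side line start
        have hrb := pvRfind_bounds '\n' (r.take posr.toNat)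
        rw [List.length_take] at hrb
        set rr := PySem.Chars.rfind (r.take posr.toNat) ['\n'] with hrrdef
        have hls0 : 0 ≤ rr + 1 := by omega
        have hlsr : rr + 1 ≤ (r.length : Int) := by omega
        -- shift B's tail computation
        rw [show (l.length : Int) + 1 + rr + 1 = ((l ++ ['\n']).length : Int) + (rr + 1) by
              simp only [List.length_append, List.length_singleton]; push_cast; ring,
          show l ++ '\n' :: r = (l ++ ['\n']) ++ r by simp,
          pvBTail_shift (l ++ ['\n']) r (rr + 1) hls0 hlsr]

-- ===== VERDICT (by name: the statement is the Claim_ definition above) =====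
theorem extract_final_report_spec : Claim_equal_extract_final_report := by
  intro output _
  unfold Spec_extract_final_report extract_final_report extract_final_report_alt
  dsimp only
  have hnl : "\n".toList = ['\n'] := by decide
  rw [hnl, show (0 : Int) = ((0 : Nat) : Int) from rfl, pvFindStartA_eq, Nat.cast_zero]
  cases hf : (PySem.Chars.splitOn output.toList ['\n']).findIdx? pvHdr with
  | none =>
    rw [Option.map_none, if_pos ((pvHdr_none output.toList).mp hf)]
  | some idx =>
    rw [Option.map_some]
    have hh : ¬ (PySem.Chars.find output.toList "FINAL REPORT".toList = -1 ∧
                 PySem.Chars.find output.toList "Final Report".toList = -1) := by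
      intro hcon
      rw [(pvHdr_none output.toList).mpr hcon] at hf
      simp at hf
    rw [if_neg hh]
    dsimp only
    have hz : (0 : Int) + (idx : Int) = ((idx : Nat) : Int) := by omega
    rw [hz, PySem.List.slice_from _ (by positivity), Int.toNat_natCast, pvReportLoopA_spec]
    -- A's value is pvATail of the dropped line list
    have hA : ∀ (L : List (List Char)),
        (some (String.ofList (PySem.Chars.strip (PySem.Chars.join ['\n']
          (match L.findIdx? pvSep with
            | none => ([], false)
            | some k => (L.drop (k + 1), true)).1))) : Option String)
          = some (String.ofList (pvATail L)) := by
      intro L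
      cases hsep : L.findIdx? pvSep with
      | none => rw [pvATail, hsep]; rfl
      | some k => rw [pvATail, hsep]
    rw [show (if PySem.Chars.find output.toList "FINAL REPORT".toList = -1 then
            PySem.Chars.find output.toList "Final Report".toList
          else if PySem.Chars.find output.toList "Final Report".toList = -1 then
            PySem.Chars.find output.toList "FINAL REPORT".toList
          else min (PySem.Chars.find output.toList "FINAL REPORT".toList)
                   (PySem.Chars.find output.toList "Final Report".toList))
        = pvPos (PySem.Chars.find output.toList "FINAL REPORT".toList)
                (PySem.Chars.find output.toList "Final Report".toList) from rfl]
    have hM := pvMain output.toList hh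
    rw [hf, Option.getD_some] at hM
    rw [hA, hM, pvBTail]
    dsimp only
    by_cases hsep : PySem.Chars.findFrom output.toList "====================".toList
        (PySem.Chars.rfindFrom output.toList ['\n'] 0
          (some (pvPos (PySem.Chars.find output.toList "FINAL REPORT".toList)
                       (PySem.Chars.find output.toList "Final Report".toList))) + 1) = -1
    · rw [if_pos hsep, if_pos hsep]
    · rw [if_neg hsep, if_neg hsep]
      by_cases hnl2 : PySem.Chars.findFrom output.toList ['\n']
          (PySem.Chars.findFrom output.toList "====================".toList
            (PySem.Chars.rfindFrom output.toList ['\n'] 0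
              (some (pvPos (PySem.Chars.find output.toList "FINAL REPORT".toList)
                           (PySem.Chars.find output.toList "Final Report".toList))) + 1)) = -1
      · rw [if_pos hnl2, if_pos hnl2]
      · rw [if_neg hnl2, if_neg hnl2]
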